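-- pv_equiv track=rewrite | github.com/ucrcsedept/galah-interact-python | interact/parse.py | cleanse_quoted_strings
-- ===== SOURCE A (Python) =====
-- def cleanse_quoted_strings(line):
--     """
--     Removes all quoted strings from a line. Single quotes are treated the same
--     as double quotes.
--
--     Escaped quotes are handled. A forward slash is assumed to be the escape
--     character. Escape sequences are not processed (meaning `\"` does not become
--     `"`, it just remains as `\"`).
--
--     :param line: A string to be cleansed.
--     :returns: The line without any quoted strings.
--
--     >>> cleanse_quoted_strings("I am 'John Sullivan', creator of worlds.")
--     "I am , creator of worlds."
--     >>> cleanse_quoted_strings(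
--     ...     'I am "John Sullivan \\"the Destroyer\\", McGee", fear me.'
--     ... )
--     "I am , fear me."
--
--     This function is of particular use when trying to detect curly braces or
--     other language constructs, and you don't want to be fooled by the symbols
--     appearing in string literals.
--
--     """
--
--     # Returns ' if " is given, returns " if ' is given.
--     inv_quote = lambda x: "'" if x == "\"" else "\""
--
--     is_quote = lambda x: x in ["\"", "'"]
--
--     # Will be a list of characters that we will join together to get the
--     # resulting string sans quoted strings.
--     unquoted_string = []
--
--     in_quotes = None
--     for i, char in enumerate(line):
--         # Check to see if this character is escaped (this will occur if there is
--         # an odd number of back slashes in front of it).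
--         num_slashes = 0
--         for j in reversed(range(0, i)):
--             if line[j] == "\\":
--                 num_slashes += 1
--             else:
--                 break
--         escaped = num_slashes % 2 == 1
--
--         if char == in_quotes and not escaped:
--             in_quotes = None
--             continue
--         elif is_quote(char) and in_quotes is None:
--             in_quotes = char
--             continue
--
--         if in_quotes is None:
--             unquoted_string.append(char)
--
--     return "".join(unquoted_string)
-- ===== SOURCE B (Python) =====
-- def cleanse_quoted_strings(line):
--     """Single pass: track the parity of the trailing backslash run
--     incrementally instead of rescanning the prefix at every character."""
--     unquoted = []
--     in_quotes = None
--     escaped = False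
--     for char in line:
--         if char == in_quotes and not escaped:
--             in_quotes = None
--         elif in_quotes is None and char in "\"'":
--             in_quotes = char
--         elif in_quotes is None:
--             unquoted.append(char)
--         escaped = char == "\\" and not escaped
--     return "".join(unquoted)
-- ===== Notes on version B (the rewrite author's own statement) =====
-- stated objective: faster
-- what changed: Replaces A's per-character backward rescan that counts the trailing backslash run with an incrementally maintained escape-parity flag, turning the quadratic scan into one linear pass.
import Mathlib
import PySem

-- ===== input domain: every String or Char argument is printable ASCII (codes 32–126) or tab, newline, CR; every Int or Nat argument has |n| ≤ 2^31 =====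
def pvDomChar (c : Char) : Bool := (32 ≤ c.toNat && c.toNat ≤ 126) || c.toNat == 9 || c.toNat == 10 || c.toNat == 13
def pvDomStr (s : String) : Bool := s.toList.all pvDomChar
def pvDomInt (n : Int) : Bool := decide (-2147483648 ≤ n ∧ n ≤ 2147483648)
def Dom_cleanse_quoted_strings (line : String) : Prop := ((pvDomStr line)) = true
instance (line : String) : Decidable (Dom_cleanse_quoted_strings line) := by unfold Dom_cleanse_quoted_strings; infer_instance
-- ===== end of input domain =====

-- B replaces A's quadratic backward rescan for escape detection by an O(n) incrementally
-- maintained escape-parity flag; same return value on every input.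

-- ===== PORT A =====
-- inner loop: for j in reversed(range(0, i)): count backslashes, break at first other char
def numSlashesA (cs : List Char) : List Int → Nat
  | [] => 0
  | j :: rest =>
    if PySem.List.pyGet? cs j = some '\\' then 1 + numSlashesA cs rest else 0

def stepA (cs : List Char) (i : Nat) (st : List Char × Option Char) (c : Char) :
    List Char × Option Char :=
  let num := numSlashesA cs ((PySem.List.pyRange 0 (i : Int) 1).reverse)
  let escaped := num % 2 == 1
  if some c == st.2 && !escaped then (st.1, none)
  else if (c == '"' || c == '\'') && st.2 == none then (st.1, some c)
  else if st.2 == none then (st.1 ++ [c], st.2)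
  else st

-- for i, char in enumerate(line)
def loopA (cs : List Char) : Nat → (List Char × Option Char) → List Char → List Char × Option Char
  | _, st, [] => st
  | i, st, c :: rest => loopA cs (i + 1) (stepA cs i st c) rest

def cleanse_quoted_strings (line : String) : String :=
  String.ofList (loopA line.toList 0 ([], none) line.toList).1

-- ===== PORT B =====
-- state: (unquoted, in_quotes, escaped); escaped is updated incrementally each step
def stepB (st : List Char × Option Char × Bool) (c : Char) : List Char × Option Char × Bool :=
  let s :=
    if some c == st.2.1 && !st.2.2 then (st.1, (none : Option Char))
    else if st.2.1 == none && (c == '"' || c == '\'') then (st.1, some c)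
    else if st.2.1 == none then (st.1 ++ [c], st.2.1)
    else (st.1, st.2.1)
  (s.1, s.2, c == '\\' && !st.2.2)

def cleanse_quoted_strings_alt (line : String) : String :=
  String.ofList (line.toList.foldl stepB ([], none, false)).1

-- ===== PRECONDITION & SPEC =====
def Spec_cleanse_quoted_strings (line : String) (out : String) : Prop := out = cleanse_quoted_strings_alt line
instance (line : String) (out : String) : Decidable (Spec_cleanse_quoted_strings line out) := by unfold Spec_cleanse_quoted_strings; infer_instance

-- ===== CLAIM (what is proved, stated in full; the proofs are below) =====
def Claim_equal_cleanse_quoted_strings : Prop := ∀ (line : String), Dom_cleanse_quoted_strings line → Spec_cleanse_quoted_strings line (cleanse_quoted_strings line)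

-- ===== LEMMAS AND PROOFS =====

-- escape parity of the prefix of length i, as B maintains it
def escOf (cs : List Char) (i : Nat) : Bool :=
  (cs.take i).foldl (fun e c => c == '\\' && !e) false

lemma parity_lemma (cs : List Char) : ∀ i : Nat, i ≤ cs.length →
    ((numSlashesA cs ((PySem.List.pyRange 0 (i : Int) 1).reverse) % 2 == 1) = escOf cs i) := by
  intro i
  induction i with
  | zero =>
    intro _
    simp [PySem.List.pyRange_one_eq_nil, numSlashesA, escOf]
  | succ i ih =>
    intro h
    have hi : i < cs.length := by omega
    have hr : PySem.List.pyRange 0 ((i : Int) + 1) 1 =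
        PySem.List.pyRange 0 (i : Int) 1 ++ [(i : Int)] :=
      PySem.List.pyRange_one_succ_right (by omega)
    have hcast : ((i + 1 : Nat) : Int) = (i : Int) + 1 := by push_cast; ring
    rw [hcast, hr]
    have hget : PySem.List.pyGet? cs (i : Int) = some cs[i] :=
      PySem.List.pyGet?_ofNat cs i hi
    have htake : cs.take (i + 1) = cs.take i ++ [cs[i]] := by
      rw [List.take_add_one]
      simp [List.getElem?_eq_getElem hi]
    simp only [List.reverse_append, List.reverse_singleton, List.singleton_append,
      numSlashesA, hget, escOf, htake, List.foldl_append, List.foldl_cons, List.foldl_nil]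
    by_cases hc : cs[i] = '\\'
    · simp only [hc, beq_self_eq_true, Bool.true_and]
      rw [← escOf, ← ih (by omega)]
      rcases Nat.mod_two_eq_zero_or_one (numSlashesA cs ((PySem.List.pyRange 0 (i : Int) 1).reverse)) with h2 | h2 <;>
        simp [Nat.add_mod, h2]
    · simp [hc]

lemma loop_eq (cs : List Char) : ∀ (rest : List Char) (i : Nat) (u : List Char) (q : Option Char),
    cs.drop i = rest →
    loopA cs i (u, q) rest =
      ((rest.foldl stepB (u, q, escOf cs i)).1, (rest.foldl stepB (u, q, escOf cs i)).2.1) := by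
  intro rest
  induction rest with
  | nil => intro i u q _; simp [loopA]
  | cons c rest' ih =>
    intro i u q hdrop
    have hi : i < cs.length := by
      by_contra h
      rw [List.drop_eq_nil_of_le (by omega)] at hdrop
      simp at hdrop
    have hget : cs[i] = c := by
      have : (cs.drop i)[0]? = some c := by rw [hdrop]; rfl
      rw [List.getElem?_drop] at this
      simpa [List.getElem?_eq_getElem hi] using this
    have hdrop' : cs.drop (i + 1) = rest' := by
      have : (cs.drop i).drop 1 = rest' := by rw [hdrop]; rfl
      rwa [List.drop_drop] at this
    have hesc' : escOf cs (i + 1) = (c == '\\' && !escOf cs i) := by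
      have htake : cs.take (i + 1) = cs.take i ++ [cs[i]] := by
        rw [List.take_add_one]
        simp [List.getElem?_eq_getElem hi]
      simp [escOf, htake, hget]
    have hstep : stepA cs i (u, q) c =
        ((stepB (u, q, escOf cs i) c).1, (stepB (u, q, escOf cs i) c).2.1) ∧
        (stepB (u, q, escOf cs i) c).2.2 = escOf cs (i + 1) := by
      constructor
      · simp only [stepA, stepB, parity_lemma cs i (by omega)]
        by_cases h1 : (some c == q && !escOf cs i) = true
        · simp [h1]
        · simp only [h1, if_neg, Bool.not_eq_true] at *
          by_cases h2 : (q == none) = true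
          · by_cases h3 : (c == '"' || c == '\'') = true
            · simp [h2, h3]
            · simp [h2, h3]
          · simp [h2]
      · simp [stepB, hesc']
    rw [List.foldl_cons]
    have := ih (i + 1) (stepB (u, q, escOf cs i) c).1 (stepB (u, q, escOf cs i) c).2.1 hdrop'
    simp only [loopA, hstep.1, this, ← hstep.2]

-- ===== VERDICT (by name: the statement is the Claim_ definition above) =====
theorem cleanse_quoted_strings_spec : Claim_equal_cleanse_quoted_strings := by
  intro line _
  unfold Spec_cleanse_quoted_strings cleanse_quoted_strings cleanse_quoted_strings_alt
  rw [loop_eq line.toList line.toList 0 [] none (by simp)]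
  rfl
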